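-- pv_equiv track=rewrite | github.com/arunava-de/coding-practice-1 | prison_after_n.py | prison_after
-- ===== SOURCE A (Python) =====
-- def prison_after(cells, n):
--     prev = cells
--     curr = [None]*len(cells)
--     curr[0] = 0
--     curr[-1] = 0
--
--     for _ in range(n):
--         for j in range(1,len(cells)-1):
--             if prev[j-1]==prev[j+1]:
--                 curr[j] = 1
--             else:
--                 curr [j] = 0
--         prev = curr[::]
--
--     return curr
-- ===== SOURCE B (Python) =====
-- def _step(s):
--     L = len(s)
--     return [1 if 0 < j < L - 1 and s[j - 1] == s[j + 1] else 0 for j in range(L)]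
--
--
-- def prison_after(cells, n):
--     state = _step(cells)
--     seen = {}
--     day = 1
--     while day < n:
--         key = tuple(state)
--         if key in seen:
--             period = day - seen[key]
--             rem = (n - day) % period
--             for _ in range(rem):
--                 state = _step(state)
--             return state
--         seen[key] = day
--         state = _step(state)
--         day += 1
--     return state
-- ===== Notes on version B (the rewrite author's own statement) =====
-- stated objective: alternative
-- what changed: B replaces A's n-fold simulation by cycle detection: it stores each seen state with its day in a dict, reduces the remaining days modulo the detected period, and simulates only the remainder.
-- outside the precondition, e.g. on prison_after([1, 2, 3], 0): A returns [0, None, 0], B returns [0, 0, 0]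
import Mathlib
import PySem

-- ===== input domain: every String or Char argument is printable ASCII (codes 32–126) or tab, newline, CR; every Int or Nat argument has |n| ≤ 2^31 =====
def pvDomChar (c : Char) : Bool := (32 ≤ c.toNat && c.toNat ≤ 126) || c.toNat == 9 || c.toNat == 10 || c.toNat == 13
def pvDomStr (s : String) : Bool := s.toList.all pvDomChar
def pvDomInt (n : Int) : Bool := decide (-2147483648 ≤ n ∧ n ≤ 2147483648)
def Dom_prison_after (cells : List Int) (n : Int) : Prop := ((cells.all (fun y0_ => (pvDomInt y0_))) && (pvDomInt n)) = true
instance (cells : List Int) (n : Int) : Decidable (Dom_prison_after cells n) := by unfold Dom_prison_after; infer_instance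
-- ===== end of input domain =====

-- B replaces A's n-fold simulation by cycle detection (dict of seen states, reduce the remaining
-- days modulo the detected period, simulate only the remainder); return values proved equal on Pre_.


-- ===== PORT A =====
-- '[None]*len(cells)' is ported with placeholder 0: under Pre_ every placeholder slot is
-- overwritten before the return (for len ≤ 2 there is no placeholder slot at all).
def prison_after (cells : List Int) (n : Int) : List Int :=
  let curr0 := PySem.List.pySetD (PySem.List.pySetD (List.replicate cells.length (0 : Int)) 0 0) (-1) 0
  let res := (PySem.List.pyRange 0 n 1).foldl
    (fun (pc : List Int × List Int) _ =>
      let curr :=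
        (PySem.List.pyRange 1 ((cells.length : Int) - 1) 1).foldl
          (fun curr j =>
            if PySem.List.pyGetD pc.1 (j - 1) 0 = PySem.List.pyGetD pc.1 (j + 1) 0 then
              PySem.List.pySetD curr j 1
            else
              PySem.List.pySetD curr j 0)
          pc.2
      (curr, curr))
    (cells, curr0)
  res.2

-- ===== PORT B =====
-- port of Source B's _step: one-day transition as a comprehension over all indices
def pa_step (s : List Int) : List Int :=
  (PySem.List.pyRange 0 (s.length : Int) 1).map (fun j =>
    if (0 < j ∧ j < (s.length : Int) - 1) ∧
        PySem.List.pyGetD s (j - 1) 0 = PySem.List.pyGetD s (j + 1) 0 then 1 else 0)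

-- port of Source B's while loop; fuel = (n - day).toNat realises 'while day < n'
def pa_loop (state : List Int) (seen : PySem.Dict (List Int) Int) (day n : Int) :
    Nat → List Int
  | 0 => state
  | fuel + 1 =>
    match seen.get? state with
    | some d0 =>
        let rem := PySem.Int.mod (n - day) (day - d0)
        (PySem.List.pyRange 0 rem 1).foldl (fun st _ => pa_step st) state
    | none => pa_loop (pa_step state) (seen.insert state day) (day + 1) n fuel

def prison_after_alt (cells : List Int) (n : Int) : List Int :=
  pa_loop (pa_step cells) PySem.Dict.empty 1 n (n - 1).toNat

-- ===== PRECONDITION & SPEC =====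
-- Pre_ excludes the empty list (A raises IndexError on 'curr[0] = 0') and n ≤ 0 with 3 or more
-- cells, where A returns a list still containing None placeholders — not a list of ints.
def Pre_prison_after (cells : List Int) (n : Int) : Prop :=
  cells ≠ [] ∧ (1 ≤ n ∨ cells.length ≤ 2)
instance (cells : List Int) (n : Int) : Decidable (Pre_prison_after cells n) := by
  unfold Pre_prison_after; infer_instance

def pvWitness_prison_after : List Int × Int := ([1, 0, 1, 1], 5)

def Spec_prison_after (cells : List Int) (n : Int) (out : List Int) : Prop :=
  out = prison_after_alt cells n
instance (cells : List Int) (n : Int) (out : List Int) : Decidable (Spec_prison_after cells n out) := by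
  unfold Spec_prison_after; infer_instance

-- ===== CLAIM (what is proved, stated in full; the proofs are below) =====
def Claim_equal_prison_after : Prop :=
  ∀ (cells : List Int) (n : Int), Dom_prison_after cells n → Pre_prison_after cells n →
    Spec_prison_after cells n (prison_after cells n)

-- ===== LEMMAS AND PROOFS =====

-- A's inner-loop body, named for the proofs (definitionally the lambda in the port of A)
def innerF (prev : List Int) : List Int → Int → List Int := fun curr j =>
  if PySem.List.pyGetD prev (j - 1) 0 = PySem.List.pyGetD prev (j + 1) 0 then
    PySem.List.pySetD curr j 1
  else
    PySem.List.pySetD curr j 0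

theorem innerF_eq (prev curr : List Int) (j : Int) :
    innerF prev curr j = PySem.List.pySetD curr j
      (if PySem.List.pyGetD prev (j - 1) 0 = PySem.List.pyGetD prev (j + 1) 0 then 1 else 0) := by
  unfold innerF; split_ifs <;> rfl

theorem inner_fold (prev : List Int) (b : Nat) :
    ∀ (curr : List Int), b ≤ curr.length →
      (((PySem.List.pyRange 1 (b : Int) 1).foldl (innerF prev) curr).length = curr.length) ∧
      (∀ (i : Nat),
        ((PySem.List.pyRange 1 (b : Int) 1).foldl (innerF prev) curr)[i]?.getD 0 =
        if 1 ≤ i ∧ i < b then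
          (if PySem.List.pyGetD prev ((i : Int) - 1) 0 = PySem.List.pyGetD prev ((i : Int) + 1) 0
            then 1 else 0)
        else curr[i]?.getD 0) := by
  induction b with
  | zero =>
    intro curr hb
    rw [show ((0 : Nat) : Int) = 0 from rfl, PySem.List.pyRange_one_eq_nil (by omega)]
    refine ⟨rfl, fun i => ?_⟩
    rw [if_neg (by omega)]; rfl
  | succ b ih =>
    intro curr hb
    by_cases hb0 : b = 0
    · subst hb0
      rw [show (((0 : Nat) + 1 : Nat) : Int) = 1 from rfl, PySem.List.pyRange_one_eq_nil (by omega)]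
      refine ⟨rfl, fun i => ?_⟩
      rw [if_neg (by omega)]; rfl
    · have hcast : (((b + 1 : Nat)) : Int) = (b : Int) + 1 := by push_cast; ring
      rw [hcast, PySem.List.pyRange_one_succ_right (by exact_mod_cast Nat.one_le_iff_ne_zero.mpr hb0),
        List.foldl_append]
      obtain ⟨hlen, hget⟩ := ih curr (by omega)
      simp only [List.foldl_cons, List.foldl_nil, innerF_eq]
      have hbl : b < ((PySem.List.pyRange 1 (b : Int) 1).foldl (innerF prev) curr).length := by
        rw [hlen]; omega
      constructor
      · rw [PySem.List.pySetD_natCast, List.length_set, hlen]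
      · intro i
        rw [PySem.List.pySetD_natCast, List.getElem?_set]
        by_cases hib : b = i
        · subst hib
          rw [if_pos rfl, if_pos hbl, if_pos (show 1 ≤ b ∧ b < b + 1 by omega)]
          split_ifs <;> rfl
        · rw [if_neg hib, hget i]
          by_cases h1 : 1 ≤ i ∧ i < b
          · rw [if_pos h1, if_pos (show 1 ≤ i ∧ i < b + 1 by omega)]
          · rw [if_neg h1, if_neg (show ¬(1 ≤ i ∧ i < b + 1) by omega)]

theorem length_pa_step (s : List Int) : (pa_step s).length = s.length := by
  simp [pa_step, PySem.List.length_pyRange_one]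

theorem pa_step_getElem? (s : List Int) (i : Nat) (hi : i < s.length) :
    (pa_step s)[i]?.getD 0 =
      if (0 < (i : Int) ∧ (i : Int) < (s.length : Int) - 1) ∧
          PySem.List.pyGetD s ((i : Int) - 1) 0 = PySem.List.pyGetD s ((i : Int) + 1) 0
        then 1 else 0 := by
  rw [List.getElem?_eq_getElem (by rw [length_pa_step]; exact hi)]
  simp [pa_step, List.getElem_map, PySem.List.getElem_pyRange_one]

-- A's one-day inner loop equals B's _step, given curr of the right length with zero ends
theorem inner_eq_pa_step (prev curr : List Int) (hlen : curr.length = prev.length)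
    (hne : prev ≠ [])
    (h0 : curr[0]?.getD 0 = 0) (hlast : curr[prev.length - 1]?.getD 0 = 0) :
    (PySem.List.pyRange 1 ((prev.length : Int) - 1) 1).foldl (innerF prev) curr =
      pa_step prev := by
  have hL : 1 ≤ prev.length := List.length_pos_iff.mpr hne
  have hcast : ((prev.length : Int) - 1) = ((prev.length - 1 : Nat) : Int) := by omega
  rw [hcast]
  obtain ⟨hlen', hget⟩ := inner_fold prev (prev.length - 1) curr (by omega)
  apply List.ext_getElem?
  intro i
  by_cases hi : i < prev.length
  · have hi2 : i < (List.foldl (innerF prev) curr (PySem.List.pyRange 1 ((prev.length - 1 : Nat) : Int))).length := by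
      rw [hlen', hlen]; exact hi
    have hi3 : i < (pa_step prev).length := by rw [length_pa_step]; exact hi
    have lhsv := hget i
    have rhsv := pa_step_getElem? prev i hi
    rw [List.getElem?_eq_getElem hi2, Option.getD_some] at lhsv
    rw [List.getElem?_eq_getElem hi3, Option.getD_some] at rhsv
    rw [List.getElem?_eq_getElem hi2, List.getElem?_eq_getElem hi3, lhsv, rhsv]
    by_cases hc : 1 ≤ i ∧ i < prev.length - 1
    · by_cases hcond : PySem.List.pyGetD prev ((i : Int) - 1) 0 = PySem.List.pyGetD prev ((i : Int) + 1) 0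
      · rw [if_pos hc, if_pos hcond, if_pos ⟨⟨by omega, by omega⟩, hcond⟩]
      · rw [if_pos hc, if_neg hcond, if_neg (fun h => hcond h.2)]
    · rw [if_neg hc, if_neg (fun h => hc ⟨by omega, by omega⟩)]
      have : i = 0 ∨ i = prev.length - 1 := by omega
      rcases this with h | h <;> subst h
      · rw [h0]
      · rw [hlast]
  · rw [List.getElem?_eq_none (by rw [hlen', hlen]; omega),
      List.getElem?_eq_none (by rw [length_pa_step]; omega)]

theorem curr0_eq (L : Nat) :
    PySem.List.pySetD (PySem.List.pySetD (List.replicate L (0:Int)) 0 0) (-1) 0 = List.replicate L 0 := by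
  have hset : ∀ k : Nat, (List.replicate L (0:Int)).set k 0 = List.replicate L 0 := by
    intro k
    apply List.ext_getElem (by simp)
    intro i h1 h2
    rw [List.getElem_set]
    split_ifs <;> simp
  have h1 : PySem.List.pySetD (List.replicate L (0:Int)) 0 0 = List.replicate L 0 := by
    rw [PySem.List.pySetD_of_nonneg _ _ (by norm_num), hset]
  rw [h1]
  simp [PySem.List.pySetD, PySem.List.pySet?, hset]
  cases PySem.List.pyIdx? L (-1) <;> simp

theorem pa_step_end0 (s : List Int) (hne : s ≠ []) : (pa_step s)[0]?.getD 0 = 0 := by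
  rw [pa_step_getElem? s 0 (List.length_pos_iff.mpr hne), if_neg]
  rintro ⟨⟨h, -⟩, -⟩; exact absurd h (by norm_num)

theorem pa_step_endL (s : List Int) (hne : s ≠ []) :
    (pa_step s)[s.length - 1]?.getD 0 = 0 := by
  have hL : 1 ≤ s.length := List.length_pos_iff.mpr hne
  rw [pa_step_getElem? s (s.length - 1) (by omega), if_neg]
  rintro ⟨⟨-, h⟩, -⟩; omega

theorem length_iter_pa_step (k : Nat) (s : List Int) :
    (pa_step^[k] s).length = s.length := by
  induction k generalizing s with
  | zero => rfl
  | succ k ih => rw [Function.iterate_succ_apply, ih, length_pa_step]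

theorem outer_fold (cells : List Int) (hne : cells ≠ []) (k : Nat) (hk : 1 ≤ k) :
    ((PySem.List.pyRange 0 (k : Int) 1).foldl
        (fun (pc : List Int × List Int) _ =>
          let curr := (PySem.List.pyRange 1 ((cells.length : Int) - 1) 1).foldl (innerF pc.1) pc.2
          (curr, curr))
        (cells, List.replicate cells.length 0)) =
      (pa_step^[k - 1] (pa_step cells), pa_step^[k - 1] (pa_step cells)) := by
  induction k with
  | zero => omega
  | succ k ih =>
    by_cases hk0 : k = 0
    · subst hk0
      rw [show (((0 : Nat) + 1 : Nat) : Int) = 0 + 1 from by norm_num,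
        PySem.List.pyRange_one_succ_right (by norm_num), PySem.List.pyRange_one_eq_nil (le_refl 0)]
      simp only [List.nil_append, List.foldl_cons, List.foldl_nil]
      rw [inner_eq_pa_step cells (List.replicate cells.length 0) (by simp) hne
        (by simp) (by simp)]
      rfl
    · have hcast : (((k + 1 : Nat)) : Int) = (k : Int) + 1 := by push_cast; ring
      rw [hcast, PySem.List.pyRange_one_succ_right (by omega), List.foldl_append,
        ih (by omega)]
      simp only [List.foldl_cons, List.foldl_nil]
      have hr : pa_step^[k - 1] (pa_step cells) = pa_step (pa_step^[k - 1] cells) := by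
        rw [← Function.iterate_succ_apply, Function.iterate_succ_apply']
      have hlen : (pa_step^[k - 1] (pa_step cells)).length = cells.length := by
        rw [length_iter_pa_step, length_pa_step]
      have hne2 : pa_step^[k - 1] cells ≠ [] := by
        intro h
        apply hne
        have hl := length_iter_pa_step (k - 1) cells
        rw [h] at hl
        exact List.length_eq_zero_iff.mp hl.symm
      have hne3 : pa_step^[k - 1] (pa_step cells) ≠ [] := by
        intro h
        apply hne
        have hl := hlen
        rw [h] at hl
        exact List.length_eq_zero_iff.mp hl.symm
      rw [show (cells.length : Int) - 1 = ((pa_step^[k-1] (pa_step cells)).length : Int) - 1 from by rw [hlen]]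
      rw [inner_eq_pa_step _ _ rfl hne3
        (by rw [hr]; exact pa_step_end0 _ hne2)
        (by rw [hr, length_pa_step]
            have := pa_step_endL (pa_step^[k - 1] cells) hne2
            rw [length_iter_pa_step] at this ⊢
            exact this)]
      have h2 : pa_step (pa_step^[k - 1] (pa_step cells)) = pa_step^[(k - 1) + 1] (pa_step cells) :=
        (Function.iterate_succ_apply' _ _ _).symm
      rw [h2, show (k - 1) + 1 = k + 1 - 1 from by omega]

theorem foldl_const_pa_step (l : List Int) (x : List Int) :
    l.foldl (fun st _ => pa_step st) x = pa_step^[l.length] x := by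
  induction l generalizing x with
  | nil => rfl
  | cons a l ih =>
    rw [List.foldl_cons, ih, List.length_cons, ← Function.iterate_succ_apply]

theorem iterate_mod_cycle (f : List Int → List Int) (x : List Int) (s p : Nat) (hp : 0 < p)
    (hcyc : f^[s + p] x = f^[s] x) : ∀ k, f^[s + k] x = f^[s + k % p] x := by
  intro k
  induction k using Nat.strong_induction_on with
  | _ k ih =>
    by_cases h : k < p
    · rw [Nat.mod_eq_of_lt h]
    · have hk : s + k = (k - p) + (s + p) := by omega
      rw [hk, Function.iterate_add_apply, hcyc, ← Function.iterate_add_apply,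
        show (k - p) + s = s + (k - p) from by omega, ih (k - p) (by omega),
        show k % p = (k - p) % p from by rw [← Nat.add_mod_right (k - p) p, Nat.sub_add_cancel (by omega)]]

theorem pa_loop_eq (s1 : List Int) : ∀ (fuel : Nat) (state : List Int)
    (seen : PySem.Dict (List Int) Int) (day n : Int),
    fuel = (n - day).toNat → 1 ≤ day → day ≤ n →
    state = pa_step^[(day - 1).toNat] s1 →
    (∀ key d0, seen.get? key = some d0 →
      1 ≤ d0 ∧ d0 < day ∧ key = pa_step^[(d0 - 1).toNat] s1) →
    pa_loop state seen day n fuel = pa_step^[(n - 1).toNat] s1 := by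
  intro fuel
  induction fuel with
  | zero =>
    intro state seen day n hfuel hday1 hdayn hstate hseen
    have : day = n := by omega
    subst this
    rw [pa_loop, hstate]
  | succ fuel ih =>
    intro state seen day n hfuel hday1 hdayn hstate hseen
    have hlt : day < n := by omega
    rw [pa_loop]
    cases hkey : seen.get? state with
    | none =>
      exact ih (pa_step state) (seen.insert state day) (day + 1) n (by omega) (by omega) (by omega)
        (by rw [hstate, show (day + 1 - 1).toNat = (day - 1).toNat + 1 from by omega,
              Function.iterate_succ_apply'])
        (by
          intro key d0 h
          by_cases hks : key = state
          · subst hks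
            rw [PySem.Dict.get?_insert_self] at h
            cases h
            exact ⟨by omega, by omega, hstate⟩
          · rw [PySem.Dict.get?_insert_of_ne _ _ hks] at h
            obtain ⟨a, b, c⟩ := hseen key d0 h
            exact ⟨a, by omega, c⟩)
    | some d0 =>
      obtain ⟨hd1, hd2, hkeyeq⟩ := hseen state d0 hkey
      simp only []
      rw [foldl_const_pa_step, PySem.List.length_pyRange_one]
      set p : Nat := (day - d0).toNat with hpdef
      set s : Nat := (d0 - 1).toNat with hsdef
      have hp : 0 < p := by omega
      have hcyc : pa_step^[s + p] s1 = pa_step^[s] s1 := by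
        rw [show s + p = (day - 1).toNat from by omega, ← hstate, hkeyeq]
      rw [hstate, ← Function.iterate_add_apply]
      set m : Int := PySem.Int.mod (n - day) (day - d0) with hmdef
      have hm0 : 0 ≤ m := PySem.Int.mod_nonneg _ (by omega)
      have hm1 : m < day - d0 := PySem.Int.mod_lt _ (by omega)
      set r : Nat := (m - 0).toNat with hrdef
      have e1 : r + (day - 1).toNat = s + (r + p) := by omega
      rw [e1, iterate_mod_cycle pa_step s1 s p hp hcyc (r + p)]
      have e2 : (n - 1).toNat = s + (n - d0).toNat := by omega
      rw [e2, iterate_mod_cycle pa_step s1 s p hp hcyc ((n - d0).toNat)]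
      congr 1
      have hleft : (r + p) % p = r := by
        rw [Nat.add_mod_right, Nat.mod_eq_of_lt (by omega)]
      have hmod : (n - d0) % (day - d0) = m := by
        rw [show n - d0 = (n - day) + (day - d0) from by ring, Int.add_emod_right, hmdef,
          ← PySem.Int.mod_eq_emod_of_pos (by omega)]
      have hsplit : (n - d0).toNat = (n - day).toNat + p := by omega
      have hnat : ((n - day) % (day - d0)).toNat = (n - day).toNat % (day - d0).toNat := by
        have h1 : (((n - day).toNat % (day - d0).toNat : Nat) : Int) = (n - day) % (day - d0) := by
          push_cast
          rw [Int.toNat_of_nonneg (by omega), Int.toNat_of_nonneg (by omega)]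
        omega
      have hright : (n - d0).toNat % p = r := by
        rw [hsplit, Nat.add_mod_right, hpdef]
        have : m = (n - day) % (day - d0) := by
          rw [hmdef, PySem.Int.mod_eq_emod_of_pos (by omega)]
        omega
      omega

theorem pa_step_small (cells : List Int) (h2 : cells.length ≤ 2) :
    pa_step cells = List.replicate cells.length 0 := by
  apply List.ext_getElem?
  intro i
  by_cases hi : i < cells.length
  · have hv := pa_step_getElem? cells i hi
    rw [List.getElem?_eq_getElem (by rw [length_pa_step]; exact hi), Option.getD_some] at hv
    rw [List.getElem?_eq_getElem (by rw [length_pa_step]; exact hi),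
      List.getElem?_eq_getElem (by simpa using hi), hv, List.getElem_replicate,
      if_neg (fun h => by omega)]
  · rw [List.getElem?_eq_none (by rw [length_pa_step]; omega),
      List.getElem?_eq_none (by simp; omega)]

-- ===== VERDICT (by name: the statement is the Claim_ definition above) =====
theorem prison_after_spec : Claim_equal_prison_after := by
  unfold Claim_equal_prison_after
  intro cells n _ hpre
  obtain ⟨hne, hcase⟩ := hpre
  unfold Spec_prison_after
  have hA : prison_after cells n =
      ((PySem.List.pyRange 0 n 1).foldl
        (fun (pc : List Int × List Int) _ =>
          let curr := (PySem.List.pyRange 1 ((cells.length : Int) - 1) 1).foldl (innerF pc.1) pc.2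
          (curr, curr))
        (cells, PySem.List.pySetD (PySem.List.pySetD (List.replicate cells.length (0 : Int)) 0 0) (-1) 0)).2 := rfl
  rw [hA, curr0_eq]
  unfold prison_after_alt
  by_cases hn : 1 ≤ n
  · rw [show PySem.List.pyRange 0 n 1 = PySem.List.pyRange 0 ((n.toNat : Nat) : Int) 1 from by
        rw [Int.toNat_of_nonneg (by omega)],
      outer_fold cells hne n.toNat (by omega)]
    rw [pa_loop_eq (pa_step cells) ((n - 1).toNat) (pa_step cells) PySem.Dict.empty 1 n rfl
      (le_refl 1) hn (by norm_num)
      (by intro key d0 h; rw [PySem.Dict.get?_empty] at h; cases h)]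
    show pa_step^[n.toNat - 1] (pa_step cells) = pa_step^[(n - 1).toNat] (pa_step cells)
    congr 1
    omega
  · have h2 : cells.length ≤ 2 := by
      rcases hcase with h | h
      · omega
      · exact h
    rw [PySem.List.pyRange_one_eq_nil (show n ≤ (0 : Int) from by omega), List.foldl_nil,
      show (n - 1).toNat = 0 from by omega]
    show List.replicate cells.length 0 = pa_step cells
    rw [pa_step_small cells h2]
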